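-- pv_equiv track=rewrite | github.com/dannfrd/skincare-analyzer-backend | database/db_connection.py | _build_warning_map
-- ===== SOURCE A (Python) =====
-- from typing import List, Dict, Any, Optional
--
-- def _build_warning_map(flags: Any) -> Dict[str, str]:
--     warning_map: Dict[str, str] = {}
--
--     if not isinstance(flags, list):
--         return warning_map
--
--     for flag in flags:
--         if not isinstance(flag, dict):
--             continue
--
--         ingredient = str(flag.get("ingredient") or "").strip().upper()
--         message = str(flag.get("message") or "").strip()
--         if not ingredient or not message:
--             continue
--
--         if ingredient in warning_map:
--             warning_map[ingredient] = f"{warning_map[ingredient]}; {message}"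
--         else:
--             warning_map[ingredient] = message
--
--     return warning_map
-- ===== SOURCE B (Python) =====
-- def _build_warning_map(flags):
--     if not isinstance(flags, list):
--         return {}
--     pairs = []
--     for flag in flags:
--         if not isinstance(flag, dict):
--             continue
--         ingredient = str(flag.get("ingredient") or "").strip().upper()
--         message = str(flag.get("message") or "").strip()
--         if ingredient and message:
--             pairs.append((ingredient, message))
--     order = dict.fromkeys(i for i, _ in pairs)
--     return {i: "; ".join(m for j, m in pairs if j == i) for i in order}
-- ===== Notes on version B (the rewrite author's own statement) =====
-- stated objective: alternative
-- what changed: B replaces A's single pass that mutates a running string map (branching on key membership and concatenating in place) by a staged pipeline: extract the normalized (ingredient, message) pairs once, dedupe the ingredients in first-appearance order, then build each entry by filtering the pair list and joining with '; '.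
import Mathlib
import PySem

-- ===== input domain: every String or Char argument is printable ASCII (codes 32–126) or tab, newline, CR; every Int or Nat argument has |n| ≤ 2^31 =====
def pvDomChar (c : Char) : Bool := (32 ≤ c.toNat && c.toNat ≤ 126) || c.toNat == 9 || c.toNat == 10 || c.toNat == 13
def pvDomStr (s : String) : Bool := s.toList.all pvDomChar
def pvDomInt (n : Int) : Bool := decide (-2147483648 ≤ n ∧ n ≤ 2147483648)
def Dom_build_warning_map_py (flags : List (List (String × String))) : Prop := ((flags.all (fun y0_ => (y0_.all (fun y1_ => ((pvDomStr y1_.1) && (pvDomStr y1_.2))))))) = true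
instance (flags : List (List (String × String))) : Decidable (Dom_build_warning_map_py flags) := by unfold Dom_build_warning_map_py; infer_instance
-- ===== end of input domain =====

-- B replaces A's single mutating pass over a string-valued dict by a staged pipeline:
-- extract normalized (ingredient, message) pairs, dedupe ingredients in first-appearance
-- order, then build each entry by filtering the pair list and joining with "; ".

-- ===== PORT A =====
-- flag.get("ingredient") or "" : first-match lookup, "" both for a missing key and an empty value
def pvIngredientA (flag : List (String × String)) : String :=
  PySem.Str.upper (PySem.Str.strip ((PySem.Dict.mk flag).getD "ingredient" ""))

def pvMessageA (flag : List (String × String)) : String :=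
  PySem.Str.strip ((PySem.Dict.mk flag).getD "message" "")

def pvStepA (wm : PySem.Dict String String) (flag : List (String × String)) :
    PySem.Dict String String :=
  if pvIngredientA flag = "" ∨ pvMessageA flag = "" then wm
  else if wm.contains (pvIngredientA flag) then
    wm.insert (pvIngredientA flag) (wm.getD (pvIngredientA flag) "" ++ "; " ++ pvMessageA flag)
  else
    wm.insert (pvIngredientA flag) (pvMessageA flag)

def build_warning_map_py (flags : List (List (String × String))) : List (String × String) :=
  (flags.foldl pvStepA PySem.Dict.empty).items

-- ===== PORT B =====
-- pairs.append((ingredient, message)) guarded by 'if ingredient and message' : one filterMap pass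
def pvExtract (flag : List (String × String)) : Option (String × String) :=
  let ingredient := PySem.Str.upper (PySem.Str.strip ((PySem.Dict.mk flag).getD "ingredient" ""))
  let message := PySem.Str.strip ((PySem.Dict.mk flag).getD "message" "")
  if ingredient ≠ "" ∧ message ≠ "" then some (ingredient, message) else none

-- order = dict.fromkeys(...) is PySem.List.dedup; the comprehension filters pairs per ingredient
def build_warning_map_py_alt (flags : List (List (String × String))) : List (String × String) :=
  let pairs := flags.filterMap pvExtract
  (PySem.List.dedup (pairs.map (·.1))).map
    (fun i => (i, PySem.Str.join "; " ((pairs.filter (fun q => q.1 == i)).map (·.2))))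

-- ===== PRECONDITION & SPEC =====
def Spec_build_warning_map_py (flags : List (List (String × String))) (out : List (String × String)) : Prop := out = build_warning_map_py_alt flags
instance (flags : List (List (String × String))) (out : List (String × String)) : Decidable (Spec_build_warning_map_py flags out) := by unfold Spec_build_warning_map_py; infer_instance

-- ===== CLAIM (what is proved, stated in full; the proofs are below) =====
def Claim_equal_build_warning_map_py : Prop := ∀ (flags : List (List (String × String))), Dom_build_warning_map_py flags → Spec_build_warning_map_py flags (build_warning_map_py flags)

-- ===== LEMMAS AND PROOFS =====

-- A's loop body seen on an extracted pair
def pvStepA2 (wm : PySem.Dict String String) (q : String × String) :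
    PySem.Dict String String :=
  if wm.contains q.1 then wm.insert q.1 (wm.getD q.1 "" ++ "; " ++ q.2)
  else wm.insert q.1 q.2

-- B's intermediate grouping dict, used only by the proof
def pvGroupStep (g : PySem.Dict String (List String)) (q : String × String) :
    PySem.Dict String (List String) :=
  g.modify q.1 [] (fun msgs => msgs ++ [q.2])

def pvJoinPair (q : String × List String) : String × String :=
  (q.1, PySem.Str.join "; " q.2)

-- A's fold over flags is its fold over the extracted pairs
lemma pvStepA_eq_elim (d : PySem.Dict String String) (flag : List (String × String)) :
    pvStepA d flag = (pvExtract flag).elim d (pvStepA2 d) := by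
  unfold pvStepA pvExtract pvIngredientA pvMessageA
  set ing := PySem.Str.upper (PySem.Str.strip ((PySem.Dict.mk flag).getD "ingredient" "")) with hi
  set msg := PySem.Str.strip ((PySem.Dict.mk flag).getD "message" "") with hm
  by_cases h1 : ing = ""
  · simp [h1]
  · by_cases h2 : msg = ""
    · simp [h1, h2]
    · simp [h1, h2, pvStepA2]

lemma pvFoldA_filterMap (flags : List (List (String × String)))
    (d : PySem.Dict String String) :
    flags.foldl pvStepA d = (flags.filterMap pvExtract).foldl pvStepA2 d := by
  induction flags generalizing d with
  | nil => rfl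
  | cons flag rest ih =>
    rw [List.foldl_cons, pvStepA_eq_elim, List.filterMap_cons]
    cases hx : pvExtract flag with
    | none => simp only [Option.elim]; exact ih d
    | some q => simp only [Option.elim]; rw [List.foldl_cons]; exact ih _

-- "; ".join at the list-of-chars level: appending one more fragment
lemma pvCharsJoinAppend (sep : List Char) (l : List (List Char)) (m : List Char) (h : l ≠ []) :
    PySem.Chars.join sep (l ++ [m]) = PySem.Chars.join sep l ++ sep ++ m := by
  induction l with
  | nil => exact absurd rfl h
  | cons x rest ih =>
    cases rest with
    | nil =>
      simp [PySem.Chars.join_cons_cons, PySem.Chars.join_singleton]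
    | cons y rest' =>
      have := ih (by simp)
      simp only [List.cons_append] at this ⊢
      rw [PySem.Chars.join_cons_cons, PySem.Chars.join_cons_cons, this]
      simp [List.append_assoc]

lemma pvJoinSingleton (m : String) : PySem.Str.join "; " [m] = m := by
  apply String.toList_inj.mp
  rw [PySem.Str.toList_join]
  simp [PySem.Chars.join_singleton]

lemma pvJoinAppend (l : List String) (m : String) (h : l ≠ []) :
    PySem.Str.join "; " (l ++ [m]) = PySem.Str.join "; " l ++ "; " ++ m := by
  apply String.toList_inj.mp
  rw [String.toList_append, String.toList_append, PySem.Str.toList_join, PySem.Str.toList_join]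
  rw [List.map_append]
  exact pvCharsJoinAppend _ _ _ (by simpa using h)

-- lookup in a dict whose items are the joined items
lemma pvGetMkMap (l : List (String × List String)) (k : String) :
    (PySem.Dict.mk (l.map pvJoinPair)).get? k
      = ((PySem.Dict.mk l).get? k).map (fun v => PySem.Str.join "; " v) := by
  induction l with
  | nil => rfl
  | cons q rest ih =>
    simp only [List.map_cons, pvJoinPair]
    rw [PySem.Dict.get?_mk_cons, PySem.Dict.get?_mk_cons]
    by_cases hq : q.1 == k
    · simp [hq]
    · simp [hq, ih]

lemma pvGetRel (d : PySem.Dict String String) (g : PySem.Dict String (List String))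
    (hitems : d.items = g.items.map pvJoinPair) (k : String) :
    d.get? k = (g.get? k).map (fun v => PySem.Str.join "; " v) := by
  have hd : d = PySem.Dict.mk d.items := rfl
  have hg : g = PySem.Dict.mk g.items := rfl
  rw [hd, hg, hitems]
  exact pvGetMkMap g.items k

lemma pvKeysRel (d : PySem.Dict String String) (g : PySem.Dict String (List String))
    (hitems : d.items = g.items.map pvJoinPair) : d.keys = g.keys := by
  simp only [PySem.Dict.keys, hitems, List.map_map]
  rfl

lemma pvContainsRel (d : PySem.Dict String String) (g : PySem.Dict String (List String))
    (hitems : d.items = g.items.map pvJoinPair) (k : String) :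
    d.contains k = g.contains k := by
  rw [PySem.Dict.contains_eq_decide_mem_keys, PySem.Dict.contains_eq_decide_mem_keys,
    pvKeysRel d g hitems]

-- one pair step preserves the relation between A's string map and the fragment map
lemma pvStepRel (q : String × String)
    (d : PySem.Dict String String) (g : PySem.Dict String (List String))
    (hitems : d.items = g.items.map pvJoinPair) (hne : ∀ p ∈ g.items, p.2 ≠ []) :
    (pvStepA2 d q).items = (pvGroupStep g q).items.map pvJoinPair
      ∧ ∀ p ∈ (pvGroupStep g q).items, p.2 ≠ [] := by
  unfold pvStepA2 pvGroupStep
  have hmod : g.modify q.1 [] (fun msgs => msgs ++ [q.2])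
      = g.insert q.1 (g.getD q.1 [] ++ [q.2]) := rfl
  rw [hmod]
  by_cases hc : g.contains q.1 = true
  · obtain ⟨v, hv⟩ : ∃ v, g.get? q.1 = some v := by
      rw [PySem.Dict.contains_eq_isSome_get?] at hc
      exact Option.isSome_iff_exists.mp hc
    have hvne : v ≠ [] := hne (q.1, v) (PySem.Dict.mem_items_of_get?_eq_some _ hv)
    have hgetd : g.getD q.1 [] = v := PySem.Dict.getD_of_get?_eq_some _ _ hv
    have hdgetd : d.getD q.1 "" = PySem.Str.join "; " v := by
      rw [PySem.Dict.getD_eq_get?_getD, pvGetRel d g hitems, hv]; rfl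
    have hdc : d.contains q.1 = true := by rw [pvContainsRel d g hitems]; exact hc
    rw [if_pos hdc]
    constructor
    · rw [PySem.Dict.items_insert_of_contains _ _ hdc,
        PySem.Dict.items_insert_of_contains _ _ hc, hitems, List.map_map, List.map_map]
      apply List.map_congr_left
      intro p hp
      simp only [Function.comp, pvJoinPair]
      by_cases hp1 : p.1 == q.1
      · simp only [hp1, if_pos, hgetd]
        rw [pvJoinAppend v q.2 hvne, hdgetd]
      · simp [hp1]
    · intro p hp
      rcases (PySem.Dict.mem_items_insert _ _ _ _).mp hp with hp | ⟨hp, _⟩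
      · subst hp; simp [hgetd, hvne]
      · exact hne p hp
  · have hcf : g.contains q.1 = false := by simpa using hc
    have hdc : d.contains q.1 = false := by rw [pvContainsRel d g hitems]; exact hcf
    have hgetd : g.getD q.1 [] = [] := PySem.Dict.getD_of_not_contains g [] hcf
    rw [if_neg (by simp [hdc])]
    constructor
    · rw [PySem.Dict.items_insert_of_not_contains _ _ hdc,
        PySem.Dict.items_insert_of_not_contains _ _ hcf, hitems, List.map_append]
      simp [pvJoinPair, hgetd, pvJoinSingleton]
    · intro p hp
      rcases (PySem.Dict.mem_items_insert _ _ _ _).mp hp with hp | ⟨hp, _⟩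
      · subst hp; simp [hgetd]
      · exact hne p hp

lemma pvLoopRel (pairs : List (String × String))
    (d : PySem.Dict String String) (g : PySem.Dict String (List String))
    (hitems : d.items = g.items.map pvJoinPair) (hne : ∀ p ∈ g.items, p.2 ≠ []) :
    (pairs.foldl pvStepA2 d).items = (pairs.foldl pvGroupStep g).items.map pvJoinPair := by
  induction pairs generalizing d g with
  | nil => simpa using hitems
  | cons q rest ih =>
    rw [List.foldl_cons, List.foldl_cons]
    obtain ⟨h1, h2⟩ := pvStepRel q d g hitems hne
    exact ih _ _ h1 h2

-- the grouping dict's items, read off as B's staged pipeline does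
lemma pvGroupItems (pairs : List (String × String)) :
    (pairs.foldl pvGroupStep PySem.Dict.empty).items
      = (PySem.List.dedup (pairs.map (·.1))).map
          (fun i => (i, (pairs.filter (fun q => q.1 == i)).map (·.2))) := by
  have hshape : pairs.foldl pvGroupStep PySem.Dict.empty
      = List.foldl (fun (d : PySem.Dict String (List String)) (q : String × String) =>
          d.modify q.1 [] (fun x => x ++ [q.2])) PySem.Dict.empty pairs := rfl
  have hnod : (pairs.foldl pvGroupStep PySem.Dict.empty).keys.Nodup := by
    rw [hshape]
    exact PySem.Dict.nodup_keys_foldl_modify_key pairs (·.1) [] (fun _ q x => x ++ [q.2])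
      PySem.Dict.empty PySem.Dict.nodup_keys_empty
  have hkeys : (pairs.foldl pvGroupStep PySem.Dict.empty).keys
      = PySem.List.dedup (pairs.map (·.1)) := by
    rw [hshape]
    have h := PySem.Dict.keys_foldl_modify_key pairs (·.1) [] (fun _ q x => x ++ [q.2])
      PySem.Dict.empty
    rw [h]
    simp [PySem.Dict.keys_empty]
    rfl
  have hget : ∀ i, (pairs.foldl pvGroupStep PySem.Dict.empty).getD i []
      = (pairs.filter (fun q => q.1 == i)).map (·.2) := by
    intro i
    rw [hshape]
    have h := PySem.Dict.getD_foldl_modify_append pairs PySem.Dict.empty i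
    rw [h]
    simp [PySem.Dict.getD_empty]
  rw [PySem.Dict.items_eq_map_keys _ hnod [], hkeys]
  apply List.map_congr_left
  intro i _
  rw [hget]

-- ===== VERDICT (by name: the statement is the Claim_ definition above) =====
theorem build_warning_map_py_spec : Claim_equal_build_warning_map_py := by
  intro flags _
  show build_warning_map_py flags = build_warning_map_py_alt flags
  unfold build_warning_map_py build_warning_map_py_alt
  rw [pvFoldA_filterMap]
  rw [pvLoopRel (flags.filterMap pvExtract) PySem.Dict.empty PySem.Dict.empty rfl
      (by intro p hp; simp [PySem.Dict.empty] at hp)]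
  rw [pvGroupItems, List.map_map]
  apply List.map_congr_left
  intro i _
  simp [pvJoinPair]
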